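-- pv_equiv track=rewrite | github.com/tenpointsdream/Crytography | AES_MixColumns/mixColumns.py | getHex_1byte
-- ===== SOURCE A (Python) =====
-- def decToHex(value):
--   if value == 10:
--     return 'A'
--   elif value == 11:
--     return 'B'
--   elif value == 12:
--     return 'C'
--   elif value == 13:
--     return 'D'
--   elif value == 14:
--     return 'E'
--   elif value == 15:
--     return 'F'
--   else:
--     return str(value)
--
-- def getHex_1byte(Bin8):
--   result1 = 0
--   result2 = 0
--   result = ''
--   i = 0
--   j = 3
--   while i < 4:
--     if Bin8[i] == '1':
--         result1 += 2**j
--     j -= 1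
--     i += 1
--   i = 4
--   j = 3
--
--   while i < 8:
--     if Bin8[i] == '1':
--         result2 += 2**j
--     j -= 1
--     i += 1
--   result = decToHex(result1) + decToHex(result2)
--   return result
-- ===== SOURCE B (Python) =====
-- def getHex_1byte(Bin8):
--     total = 0
--     for i in range(8):
--         total = total * 2 + (1 if Bin8[i] == '1' else 0)
--     hi, lo = divmod(total, 16)
--     digits = '0123456789ABCDEF'
--     return digits[hi] + digits[lo]
-- ===== Notes on version B (the rewrite author's own statement) =====
-- stated objective: simpler
-- what changed: Replaces the two nibble while-loops and the decToHex if-chain by a single Horner pass accumulating the byte value, a divmod split into nibbles, and a hex-digit lookup table.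
import Mathlib
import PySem

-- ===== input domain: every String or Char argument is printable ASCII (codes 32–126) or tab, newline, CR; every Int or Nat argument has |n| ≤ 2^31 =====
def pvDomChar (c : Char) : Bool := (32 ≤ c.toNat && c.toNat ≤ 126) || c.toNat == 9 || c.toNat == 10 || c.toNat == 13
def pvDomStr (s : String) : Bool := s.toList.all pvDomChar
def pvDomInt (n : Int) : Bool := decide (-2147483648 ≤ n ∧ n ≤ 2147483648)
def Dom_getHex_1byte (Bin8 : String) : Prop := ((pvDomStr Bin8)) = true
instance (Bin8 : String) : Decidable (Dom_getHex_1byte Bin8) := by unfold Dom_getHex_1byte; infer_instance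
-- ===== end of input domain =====

-- B replaces A's two nibble loops and decToHex if-chain with one Horner pass, a divmod split and a hex-table lookup (objective: simpler); same return value for every string of length ≥ 8.
-- ===== PORT A =====
-- port of decToHex: the if-chain, else str(value)
def decToHexPort (value : Int) : String :=
  if value = 10 then "A"
  else if value = 11 then "B"
  else if value = 12 then "C"
  else if value = 13 then "D"
  else if value = 14 then "E"
  else if value = 15 then "F"
  else PySem.Int.toStr value

-- each while loop = fold over its index range, carrying (result, j); 2**j ported as 2 ^ j.toNat (j stays ≥ 0 here)
def getHex_1byte (Bin8 : String) : String :=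
  let s1 := (PySem.List.pyRange 0 4 1).foldl
    (fun (st : Int × Int) i =>
      ((if PySem.Str.pyGet? Bin8 i = some '1' then st.1 + 2 ^ st.2.toNat else st.1), st.2 - 1))
    ((0 : Int), (3 : Int))
  let s2 := (PySem.List.pyRange 4 8 1).foldl
    (fun (st : Int × Int) i =>
      ((if PySem.Str.pyGet? Bin8 i = some '1' then st.1 + 2 ^ st.2.toNat else st.1), st.2 - 1))
    ((0 : Int), (3 : Int))
  decToHexPort s1.1 ++ decToHexPort s2.1

-- ===== PORT B =====
-- single Horner pass, divmod split, table lookup ('.getD' only totalizes: 0 ≤ total ≤ 255 so both lookups are in range)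
def getHex_1byte_alt (Bin8 : String) : String :=
  let total := (PySem.List.pyRange 0 8 1).foldl
    (fun (t : Int) i => t * 2 + (if PySem.Str.pyGet? Bin8 i = some '1' then 1 else 0)) 0
  let hi := PySem.Int.floordiv total 16
  let lo := PySem.Int.mod total 16
  let digits := "0123456789ABCDEF"
  ((PySem.Str.pyGet? digits hi).getD ' ').toString ++ ((PySem.Str.pyGet? digits lo).getD ' ').toString

-- ===== PRECONDITION & SPEC =====
-- Pre_ excludes strings shorter than 8 characters, on which A raises IndexError (B raises there too).
def Pre_getHex_1byte (Bin8 : String) : Prop := 8 ≤ Bin8.toList.length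
instance (Bin8 : String) : Decidable (Pre_getHex_1byte Bin8) := by unfold Pre_getHex_1byte; infer_instance
def pvWitness_getHex_1byte : String := "01011010"

def Spec_getHex_1byte (Bin8 : String) (out : String) : Prop := out = getHex_1byte_alt Bin8
instance (Bin8 : String) (out : String) : Decidable (Spec_getHex_1byte Bin8 out) := by unfold Spec_getHex_1byte; infer_instance

-- ===== CLAIM (what is proved, stated in full; the proofs are below) =====
def Claim_equal_getHex_1byte : Prop := ∀ (Bin8 : String), Dom_getHex_1byte Bin8 → Pre_getHex_1byte Bin8 → Spec_getHex_1byte Bin8 (getHex_1byte Bin8)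

-- ===== LEMMAS AND PROOFS =====

-- ===== VERDICT (by name: the statement is the Claim_ definition above) =====
theorem getHex_1byte_spec : Claim_equal_getHex_1byte := by
  intro Bin8 _ hpre
  unfold Spec_getHex_1byte
  obtain ⟨c0, c1, c2, c3, c4, c5, c6, c7, rest, h⟩ :
      ∃ c0 c1 c2 c3 c4 c5 c6 c7 rest,
        Bin8.toList = c0 :: c1 :: c2 :: c3 :: c4 :: c5 :: c6 :: c7 :: rest := by
    unfold Pre_getHex_1byte at hpre
    match hl : Bin8.toList, hpre with
    | c0 :: c1 :: c2 :: c3 :: c4 :: c5 :: c6 :: c7 :: rest, _ =>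
      exact ⟨c0, c1, c2, c3, c4, c5, c6, c7, rest, rfl⟩
  have g0 : PySem.Str.pyGet? Bin8 0 = some c0 := by
    simp [PySem.Str.pyGet?, h, PySem.List.pyGet?, PySem.List.pyIdx?]
    rw [if_pos (by omega)]
    simp
  have g1 : PySem.Str.pyGet? Bin8 1 = some c1 := by
    simp [PySem.Str.pyGet?, h, PySem.List.pyGet?, PySem.List.pyIdx?]
    rw [if_pos (by omega)]
    simp
  have g2 : PySem.Str.pyGet? Bin8 2 = some c2 := by
    simp [PySem.Str.pyGet?, h, PySem.List.pyGet?, PySem.List.pyIdx?]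
    rw [if_pos (by omega)]
    simp
  have g3 : PySem.Str.pyGet? Bin8 3 = some c3 := by
    simp [PySem.Str.pyGet?, h, PySem.List.pyGet?, PySem.List.pyIdx?]
    rw [if_pos (by omega)]
    simp
  have g4 : PySem.Str.pyGet? Bin8 4 = some c4 := by
    simp [PySem.Str.pyGet?, h, PySem.List.pyGet?, PySem.List.pyIdx?]
    rw [if_pos (by omega)]
    simp
  have g5 : PySem.Str.pyGet? Bin8 5 = some c5 := by
    simp [PySem.Str.pyGet?, h, PySem.List.pyGet?, PySem.List.pyIdx?]
    rw [if_pos (by omega)]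
    simp
  have g6 : PySem.Str.pyGet? Bin8 6 = some c6 := by
    simp [PySem.Str.pyGet?, h, PySem.List.pyGet?, PySem.List.pyIdx?]
    rw [if_pos (by omega)]
    simp
  have g7 : PySem.Str.pyGet? Bin8 7 = some c7 := by
    simp [PySem.Str.pyGet?, h, PySem.List.pyGet?, PySem.List.pyIdx?]
    rw [if_pos (by omega)]
    simp
  have r04 : PySem.List.pyRange 0 4 1 = [0, 1, 2, 3] := by decide
  have r48 : PySem.List.pyRange 4 8 1 = [4, 5, 6, 7] := by decide
  have r08 : PySem.List.pyRange 0 8 1 = [0, 1, 2, 3, 4, 5, 6, 7] := by decide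
  simp only [getHex_1byte, getHex_1byte_alt, r04, r48, r08, List.foldl,
    g0, g1, g2, g3, g4, g5, g6, g7, Option.some.injEq]
  by_cases h0 : c0 = '1' <;> by_cases h1 : c1 = '1' <;> by_cases h2 : c2 = '1' <;>
    by_cases h3 : c3 = '1' <;> by_cases h4 : c4 = '1' <;> by_cases h5 : c5 = '1' <;>
    by_cases h6 : c6 = '1' <;> by_cases h7 : c7 = '1' <;>
    simp only [h0, h1, h2, h3, h4, h5, h6, h7, if_pos, if_neg, not_false_iff] <;>
    decide
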